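-- pv_equiv track=rewrite | github.com/joshbelot/cogsci-wordsearch-final | Wordsearch_Generator/Wordsearch.py | _remove_substring_words
-- ===== SOURCE A (Python) =====
-- from typing import List, Tuple, Optional
--
-- def _remove_substring_words(words: List[str]) -> List[str]:
--     """
--     Remove words that are substrings of other words in the list.
--     Keeps longer words and removes shorter ones.
--
--     Args:
--         words: List of words to filter
--
--     Returns:
--         Filtered list with no substring duplicates
--     """
--     # Sort by length (longest first) to prioritize keeping longer words
--     sorted_words = sorted(words, key=len, reverse=True)
--     filtered = []
--
--     for word in sorted_words:
--         # Check if this word is a substring of any already-kept word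
--         is_substring = False
--         for kept_word in filtered:
--             if word in kept_word and word != kept_word:
--                 is_substring = True
--                 break
--
--         if not is_substring:
--             filtered.append(word)
--
--     return filtered
-- ===== SOURCE B (Python) =====
-- def _remove_substring_words(words):
--     """Sieve: commit the current longest word, prune every strict substring of
--     it from the remaining list, repeat on what is left. The kept list is never
--     scanned; dropped words disappear before they are ever examined."""
--     rest = sorted(words, key=len, reverse=True)
--     result = []
--     while rest:
--         head = rest[0]
--         result.append(head)
--         rest = [w for w in rest[1:] if not (w in head and w != head)]
--     return result
-- ===== Notes on version B (the rewrite author's own statement) =====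
-- stated objective: alternative
-- what changed: Accumulator scan replaced by a substring sieve: recursively commit the longest remaining word and immediately prune its strict substrings from the rest, so no kept-word list is ever maintained or scanned.
import Mathlib
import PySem

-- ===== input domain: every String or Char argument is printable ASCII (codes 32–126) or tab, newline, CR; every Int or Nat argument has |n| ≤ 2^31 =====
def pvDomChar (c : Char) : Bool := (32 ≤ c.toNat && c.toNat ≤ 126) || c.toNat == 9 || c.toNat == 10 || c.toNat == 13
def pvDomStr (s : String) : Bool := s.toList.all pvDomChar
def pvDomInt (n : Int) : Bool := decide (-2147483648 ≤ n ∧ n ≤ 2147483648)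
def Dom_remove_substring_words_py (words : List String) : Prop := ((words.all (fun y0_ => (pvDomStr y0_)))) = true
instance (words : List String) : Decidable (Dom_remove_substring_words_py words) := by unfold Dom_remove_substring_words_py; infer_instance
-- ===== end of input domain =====

-- B replaces A's kept-accumulator scan by a substring sieve: commit the longest remaining
-- word, prune its strict substrings from the rest, recurse (objective: alternative).


-- ===== PORT A =====
def remove_substring_words_py (words : List String) : List String :=
  let sorted_words := PySem.List.sorted words (fun w => PySem.Str.len w) true
  sorted_words.foldl
    (fun filtered word =>
      let is_substring := filtered.any (fun kept_word =>
        PySem.Str.isIn word kept_word && word != kept_word)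
      if is_substring then filtered else filtered ++ [word])
    []

-- ===== PORT B =====
-- Source B's while loop over (result, rest)
def pvSieve : List String → List String → List String
  | result, [] => result
  | result, head :: tail =>
    pvSieve (result ++ [head]) (tail.filter (fun w => !(PySem.Str.isIn w head && w != head)))
termination_by _ rest => rest.length
decreasing_by simpa using Nat.lt_succ_of_le (List.length_filter_le _ _)

def remove_substring_words_py_alt (words : List String) : List String :=
  pvSieve [] (PySem.List.sorted words (fun w => PySem.Str.len w) true)

-- ===== PRECONDITION & SPEC =====
def Spec_remove_substring_words_py (words : List String) (out : List String) : Prop := out = remove_substring_words_py_alt words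
instance (words : List String) (out : List String) : Decidable (Spec_remove_substring_words_py words out) := by unfold Spec_remove_substring_words_py; infer_instance

-- ===== CLAIM (what is proved, stated in full; the proofs are below) =====
def Claim_equal_remove_substring_words_py : Prop := ∀ (words : List String), Dom_remove_substring_words_py words → Spec_remove_substring_words_py words (remove_substring_words_py words)

-- ===== LEMMAS AND PROOFS =====

-- the sieve with the committed words peeled off the accumulator
def pvGo : List String → List String
  | [] => []
  | head :: tail =>
    head :: pvGo (tail.filter (fun w => !(PySem.Str.isIn w head && w != head)))
termination_by l => l.length
decreasing_by simpa using Nat.lt_succ_of_le (List.length_filter_le _ _)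

lemma pvSieve_eq_aux : ∀ (n : Nat) (rest result : List String), rest.length ≤ n →
    pvSieve result rest = result ++ pvGo rest := by
  intro n
  induction n with
  | zero =>
    intro rest result h
    obtain rfl : rest = [] := List.eq_nil_of_length_eq_zero (Nat.le_zero.mp h)
    simp [pvSieve, pvGo]
  | succ n ih =>
    intro rest result h
    match rest with
    | [] => simp [pvSieve, pvGo]
    | head :: tail =>
      rw [pvSieve, pvGo,
        ih _ _ (Nat.le_trans (List.length_filter_le _ _) (Nat.le_of_succ_le_succ h)),
        List.append_assoc]
      rfl

lemma pvSieve_eq (rest result : List String) : pvSieve result rest = result ++ pvGo rest :=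
  pvSieve_eq_aux rest.length rest result (Nat.le_refl _)

-- A's drop test, as a function of the candidate word and one kept word
def pvTst (w v : String) : Bool := PySem.Str.isIn w v && w != v

-- A's accumulator loop on the remaining list l equals acc followed by the sieve
-- of the words of l that no member of acc strictly contains.
lemma pv_loop : ∀ (l acc : List String),
    l.foldl
      (fun filtered word =>
        let is_substring := filtered.any (fun kept_word =>
          PySem.Str.isIn word kept_word && word != kept_word)
        if is_substring then filtered else filtered ++ [word]) acc
  = acc ++ pvGo (l.filter (fun w => !(acc.any (pvTst w)))) := by
  intro l
  induction l with
  | nil => intro acc; simp [pvGo]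
  | cons w l' ih =>
    intro acc
    simp only [List.foldl_cons, List.filter_cons]
    rcases h : acc.any (pvTst w) with _ | _
    · -- w is kept: append to the accumulator
      have h' : (acc.any (fun kept_word =>
          PySem.Str.isIn w kept_word && w != kept_word)) = false := h
      rw [if_neg (fun hc => Bool.false_ne_true (h'.symm.trans hc))]
      rw [ih (acc ++ [w])]
      have hfilt : l'.filter (fun x => !((acc ++ [w]).any (pvTst x)))
          = (l'.filter (fun x => !(acc.any (pvTst x)))).filter
              (fun x => !(pvTst x w)) := by
        rw [List.filter_filter]
        apply List.filter_congr
        intro x _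
        simp [pvTst, Bool.and_comm, Bool.or_comm]
      rw [hfilt]
      simp [pvGo, pvTst]
    · -- w is dropped: some kept word strictly contains it
      have h' : (acc.any (fun kept_word =>
          PySem.Str.isIn w kept_word && w != kept_word)) = true := h
      rw [if_pos h']
      simpa using ih acc

-- ===== VERDICT (by name: the statement is the Claim_ definition above) =====
theorem remove_substring_words_py_spec : Claim_equal_remove_substring_words_py := by
  intro words _
  unfold Spec_remove_substring_words_py remove_substring_words_py remove_substring_words_py_alt
  rw [pvSieve_eq]
  simpa using pv_loop (PySem.List.sorted words (fun w => PySem.Str.len w) true) []
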